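-- pv_equiv track=rewrite | github.com/Saoussen-CH/customer-support-mas-ai | tests/test_customer_support.py | validate_multi_agent_handoff
-- ===== SOURCE A (Python) =====
-- def validate_multi_agent_handoff(tool_calls, expected_agents):
--     """
--     Validate that multiple agents were invoked correctly.
--
--     Args:
--         tool_calls: List of tool calls made during conversation
--         expected_agents: List of agent names that should have been invoked
--
--     Returns:
--         bool: True if all expected agents were invoked
--     """
--     invoked_tools = {call.get("name") for call in tool_calls}
--
--     # Map tools to their agents
--     agent_tool_mapping = {
--         "product_agent": ["search_products", "get_product_details"],
--         "order_agent": ["track_order", "get_order_history"],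
--         "billing_agent": ["get_invoice", "get_invoice_by_order_id", "check_payment_status"]
--     }
--
--     invoked_agents = set()
--     for agent, tools in agent_tool_mapping.items():
--         if any(tool in invoked_tools for tool in tools):
--             invoked_agents.add(agent)
--
--     return all(agent in invoked_agents for agent in expected_agents)
-- ===== SOURCE B (Python) =====
-- # Reverse index tool -> agent; one pass over tool_calls with direct lookups
-- # instead of scanning the agent mapping and testing set membership.
-- _TOOL_TO_AGENT = {
--     "search_products": "product_agent",
--     "get_product_details": "product_agent",
--     "track_order": "order_agent",
--     "get_order_history": "order_agent",
--     "get_invoice": "billing_agent",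
--     "get_invoice_by_order_id": "billing_agent",
--     "check_payment_status": "billing_agent",
-- }
--
-- def validate_multi_agent_handoff(tool_calls, expected_agents):
--     invoked_agents = set()
--     for call in tool_calls:
--         agent = _TOOL_TO_AGENT.get(call.get("name"))
--         if agent is not None:
--             invoked_agents.add(agent)
--     return all(agent in invoked_agents for agent in expected_agents)
-- ===== Notes on version B (the rewrite author's own statement) =====
-- stated objective: alternative
-- what changed: B replaces A's tool-set construction plus per-agent any-membership scan over the agent mapping with a constant reverse index tool->agent and a single pass over tool_calls collecting invoked agents by direct lookup.
import Mathlib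
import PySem

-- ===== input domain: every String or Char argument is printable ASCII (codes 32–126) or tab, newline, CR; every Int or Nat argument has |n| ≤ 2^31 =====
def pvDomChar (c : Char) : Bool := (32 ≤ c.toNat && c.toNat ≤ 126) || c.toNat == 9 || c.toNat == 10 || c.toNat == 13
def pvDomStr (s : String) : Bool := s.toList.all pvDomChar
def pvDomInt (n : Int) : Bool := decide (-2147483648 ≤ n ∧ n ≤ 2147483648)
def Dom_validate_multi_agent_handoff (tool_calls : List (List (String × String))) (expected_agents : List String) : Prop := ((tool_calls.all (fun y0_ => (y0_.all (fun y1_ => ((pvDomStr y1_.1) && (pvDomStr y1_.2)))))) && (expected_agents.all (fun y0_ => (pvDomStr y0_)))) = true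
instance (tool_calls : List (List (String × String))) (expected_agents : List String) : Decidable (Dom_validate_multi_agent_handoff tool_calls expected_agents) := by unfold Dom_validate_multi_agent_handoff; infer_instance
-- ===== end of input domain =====

-- B builds a constant reverse index tool -> agent and makes one pass over tool_calls with
-- direct lookups, instead of A's tool-name set plus per-agent membership scan (alternative decomposition).

-- ===== PORT A =====
def validate_multi_agent_handoff (tool_calls : List (List (String × String))) (expected_agents : List String) : Bool :=
  let invoked_tools : PySem.Set (Option String) :=
    PySem.Set.ofList (tool_calls.map (fun call => PySem.Dict.get? (PySem.Dict.mk call) "name"))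
  let agent_tool_mapping : List (String × List String) :=
    [("product_agent", ["search_products", "get_product_details"]),
     ("order_agent", ["track_order", "get_order_history"]),
     ("billing_agent", ["get_invoice", "get_invoice_by_order_id", "check_payment_status"])]
  let invoked_agents : PySem.Set String :=
    agent_tool_mapping.foldl (fun s p =>
      if p.2.any (fun tool => PySem.Set.contains invoked_tools (some tool)) then PySem.Set.add s p.1 else s)
      PySem.Set.empty
  expected_agents.all (fun agent => PySem.Set.contains invoked_agents agent)

-- ===== PORT B =====
-- B-side helper: module-level reverse index from Source B
def pvToolToAgent : PySem.Dict String String :=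
  PySem.Dict.ofList
    [("search_products", "product_agent"),
     ("get_product_details", "product_agent"),
     ("track_order", "order_agent"),
     ("get_order_history", "order_agent"),
     ("get_invoice", "billing_agent"),
     ("get_invoice_by_order_id", "billing_agent"),
     ("check_payment_status", "billing_agent")]

def validate_multi_agent_handoff_alt (tool_calls : List (List (String × String))) (expected_agents : List String) : Bool :=
  let invoked_agents : PySem.Set String :=
    tool_calls.foldl (fun s call =>
      match (PySem.Dict.get? (PySem.Dict.mk call) "name").bind
              (fun n => PySem.Dict.get? pvToolToAgent n) with
      | some agent => PySem.Set.add s agent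
      | none => s) PySem.Set.empty
  expected_agents.all (fun agent => PySem.Set.contains invoked_agents agent)

-- ===== PRECONDITION & SPEC =====
def Spec_validate_multi_agent_handoff (tool_calls : List (List (String × String))) (expected_agents : List String) (out : Bool) : Prop := out = validate_multi_agent_handoff_alt tool_calls expected_agents
instance (tool_calls : List (List (String × String))) (expected_agents : List String) (out : Bool) : Decidable (Spec_validate_multi_agent_handoff tool_calls expected_agents out) := by unfold Spec_validate_multi_agent_handoff; infer_instance

-- ===== CLAIM (what is proved, stated in full; the proofs are below) =====
def Claim_equal_validate_multi_agent_handoff : Prop := ∀ (tool_calls : List (List (String × String))) (expected_agents : List String), Dom_validate_multi_agent_handoff tool_calls expected_agents → Spec_validate_multi_agent_handoff tool_calls expected_agents (validate_multi_agent_handoff tool_calls expected_agents)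

-- ===== LEMMAS AND PROOFS =====

-- abbreviation used only by the proofs
def Hit (tc : List (List (String × String))) (t : String) : Prop :=
  ∃ c ∈ tc, PySem.Dict.get? (PySem.Dict.mk c) "name" = some t

-- membership in B's accumulated set
theorem mem_foldl_resolve (g : List (String × String) → Option String)
    (tc : List (List (String × String))) (s : PySem.Set String) (a : String) :
    a ∈ tc.foldl (fun s call => match g call with
      | some agent => PySem.Set.add s agent
      | none => s) s ↔ a ∈ s ∨ ∃ c ∈ tc, g c = some a := by
  induction tc generalizing s with
  | nil => simp
  | cons c cs ih =>
    simp only [List.foldl_cons]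
    rw [ih]
    cases h : g c with
    | none =>
      simp only [List.mem_cons]
      constructor
      · rintro (hs | ⟨c', hc', hg⟩)
        · exact Or.inl hs
        · exact Or.inr ⟨c', Or.inr hc', hg⟩
      · rintro (hs | ⟨c', (rfl | hc'), hg⟩)
        · exact Or.inl hs
        · exact absurd hg (by simp [h])
        · exact Or.inr ⟨c', hc', hg⟩
    | some ag =>
      simp only [PySem.Set.mem_add, List.mem_cons]
      constructor
      · rintro ((hs | rfl) | ⟨c', hc', hg⟩)
        · exact Or.inl hs
        · exact Or.inr ⟨c, Or.inl rfl, h⟩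
        · exact Or.inr ⟨c', Or.inr hc', hg⟩
      · rintro (hs | ⟨c', (rfl | hc'), hg⟩)
        · exact Or.inl (Or.inl hs)
        · exact Or.inl (Or.inr (by rw [h] at hg; exact (Option.some_inj.mp hg).symm))
        · exact Or.inr ⟨c', hc', hg⟩

-- characterisation of the reverse-index lookup
theorem lookup_rev (n a : String) :
    PySem.Dict.get? pvToolToAgent n = some a ↔
      (n = "search_products" ∧ a = "product_agent") ∨
      (n = "get_product_details" ∧ a = "product_agent") ∨
      (n = "track_order" ∧ a = "order_agent") ∨
      (n = "get_order_history" ∧ a = "order_agent") ∨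
      (n = "get_invoice" ∧ a = "billing_agent") ∨
      (n = "get_invoice_by_order_id" ∧ a = "billing_agent") ∨
      (n = "check_payment_status" ∧ a = "billing_agent") := by
  have hlit : pvToolToAgent = PySem.Dict.mk
    [("search_products", "product_agent"),
     ("get_product_details", "product_agent"),
     ("track_order", "order_agent"),
     ("get_order_history", "order_agent"),
     ("get_invoice", "billing_agent"),
     ("get_invoice_by_order_id", "billing_agent"),
     ("check_payment_status", "billing_agent")] := by decide
  rw [hlit]
  simp only [PySem.Dict.get?_mk_cons, beq_iff_eq]
  split_ifs with h1 h2 h3 h4 h5 h6 h7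
  · subst h1; simp [eq_comm]
  · subst h2; simp [eq_comm]
  · subst h3; simp [eq_comm]
  · subst h4; simp [eq_comm]
  · subst h5; simp [eq_comm]
  · subst h6; simp [eq_comm]
  · subst h7; simp [eq_comm]
  · simp only [PySem.Dict.get?]
    simp
    exact ⟨fun hh => (h1 hh.symm).elim, fun hh => (h2 hh.symm).elim, fun hh => (h3 hh.symm).elim,
      fun hh => (h4 hh.symm).elim, fun hh => (h5 hh.symm).elim, fun hh => (h6 hh.symm).elim,
      fun hh => (h7 hh.symm).elim⟩

theorem bind_lookup_eq_some (c : List (String × String)) (a : String) :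
    ((PySem.Dict.get? (PySem.Dict.mk c) "name").bind
        (fun n => PySem.Dict.get? pvToolToAgent n) = some a) ↔
      (PySem.Dict.get? (PySem.Dict.mk c) "name" = some "search_products" ∧ a = "product_agent") ∨
      (PySem.Dict.get? (PySem.Dict.mk c) "name" = some "get_product_details" ∧ a = "product_agent") ∨
      (PySem.Dict.get? (PySem.Dict.mk c) "name" = some "track_order" ∧ a = "order_agent") ∨
      (PySem.Dict.get? (PySem.Dict.mk c) "name" = some "get_order_history" ∧ a = "order_agent") ∨
      (PySem.Dict.get? (PySem.Dict.mk c) "name" = some "get_invoice" ∧ a = "billing_agent") ∨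
      (PySem.Dict.get? (PySem.Dict.mk c) "name" = some "get_invoice_by_order_id" ∧ a = "billing_agent") ∨
      (PySem.Dict.get? (PySem.Dict.mk c) "name" = some "check_payment_status" ∧ a = "billing_agent") := by
  cases h : PySem.Dict.get? (PySem.Dict.mk c) "name" with
  | none => simp
  | some n => simp [lookup_rev]

theorem memB (tc : List (List (String × String))) (a : String) :
    (a ∈ tc.foldl (fun s call => match (PySem.Dict.get? (PySem.Dict.mk call) "name").bind
              (fun n => PySem.Dict.get? pvToolToAgent n) with
      | some agent => PySem.Set.add s agent
      | none => s) PySem.Set.empty) ↔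
      ((Hit tc "search_products" ∨ Hit tc "get_product_details") ∧ a = "product_agent") ∨
      ((Hit tc "track_order" ∨ Hit tc "get_order_history") ∧ a = "order_agent") ∨
      ((Hit tc "get_invoice" ∨ Hit tc "get_invoice_by_order_id" ∨ Hit tc "check_payment_status") ∧ a = "billing_agent") := by
  rw [mem_foldl_resolve]
  simp only [PySem.Set.empty, List.not_mem_nil, false_or, bind_lookup_eq_some, Hit]
  constructor
  · rintro ⟨c, hc, h⟩
    rcases h with ⟨h, rfl⟩ | ⟨h, rfl⟩ | ⟨h, rfl⟩ | ⟨h, rfl⟩ | ⟨h, rfl⟩ | ⟨h, rfl⟩ | ⟨h, rfl⟩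
    · exact Or.inl ⟨Or.inl ⟨c, hc, h⟩, rfl⟩
    · exact Or.inl ⟨Or.inr ⟨c, hc, h⟩, rfl⟩
    · exact Or.inr (Or.inl ⟨Or.inl ⟨c, hc, h⟩, rfl⟩)
    · exact Or.inr (Or.inl ⟨Or.inr ⟨c, hc, h⟩, rfl⟩)
    · exact Or.inr (Or.inr ⟨Or.inl ⟨c, hc, h⟩, rfl⟩)
    · exact Or.inr (Or.inr ⟨Or.inr (Or.inl ⟨c, hc, h⟩), rfl⟩)
    · exact Or.inr (Or.inr ⟨Or.inr (Or.inr ⟨c, hc, h⟩), rfl⟩)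
  · rintro (⟨(⟨c, hc, h⟩ | ⟨c, hc, h⟩), rfl⟩ | ⟨(⟨c, hc, h⟩ | ⟨c, hc, h⟩), rfl⟩ |
      ⟨(⟨c, hc, h⟩ | ⟨c, hc, h⟩ | ⟨c, hc, h⟩), rfl⟩) <;> exact ⟨c, hc, by tauto⟩

theorem contains_tools (tc : List (List (String × String))) (t : String) :
    PySem.Set.contains (PySem.Set.ofList (tc.map (fun call => PySem.Dict.get? (PySem.Dict.mk call) "name"))) (some t) = true ↔ Hit tc t := by
  rw [PySem.Set.contains_iff]
  simp [PySem.Set.mem_ofList, Hit, eq_comm]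

theorem memA (tc : List (List (String × String))) (a : String) :
    (a ∈ ([("product_agent", ["search_products", "get_product_details"]),
     ("order_agent", ["track_order", "get_order_history"]),
     ("billing_agent", ["get_invoice", "get_invoice_by_order_id", "check_payment_status"])] :
       List (String × List String)).foldl (fun s p =>
      if p.2.any (fun tool => PySem.Set.contains (PySem.Set.ofList (tc.map (fun call => PySem.Dict.get? (PySem.Dict.mk call) "name"))) (some tool)) then PySem.Set.add s p.1 else s)
      PySem.Set.empty) ↔
      ((Hit tc "search_products" ∨ Hit tc "get_product_details") ∧ a = "product_agent") ∨
      ((Hit tc "track_order" ∨ Hit tc "get_order_history") ∧ a = "order_agent") ∨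
      ((Hit tc "get_invoice" ∨ Hit tc "get_invoice_by_order_id" ∨ Hit tc "check_payment_status") ∧ a = "billing_agent") := by
  have e1 : (PySem.Set.contains (PySem.Set.ofList (tc.map (fun call => PySem.Dict.get? (PySem.Dict.mk call) "name"))) (some "search_products") || PySem.Set.contains (PySem.Set.ofList (tc.map (fun call => PySem.Dict.get? (PySem.Dict.mk call) "name"))) (some "get_product_details")) = true ↔ Hit tc "search_products" ∨ Hit tc "get_product_details" := by
    rw [Bool.or_eq_true, contains_tools, contains_tools]
  have e2 : (PySem.Set.contains (PySem.Set.ofList (tc.map (fun call => PySem.Dict.get? (PySem.Dict.mk call) "name"))) (some "track_order") || PySem.Set.contains (PySem.Set.ofList (tc.map (fun call => PySem.Dict.get? (PySem.Dict.mk call) "name"))) (some "get_order_history")) = true ↔ Hit tc "track_order" ∨ Hit tc "get_order_history" := by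
    rw [Bool.or_eq_true, contains_tools, contains_tools]
  have e3 : (PySem.Set.contains (PySem.Set.ofList (tc.map (fun call => PySem.Dict.get? (PySem.Dict.mk call) "name"))) (some "get_invoice") || (PySem.Set.contains (PySem.Set.ofList (tc.map (fun call => PySem.Dict.get? (PySem.Dict.mk call) "name"))) (some "get_invoice_by_order_id") || PySem.Set.contains (PySem.Set.ofList (tc.map (fun call => PySem.Dict.get? (PySem.Dict.mk call) "name"))) (some "check_payment_status"))) = true ↔ Hit tc "get_invoice" ∨ Hit tc "get_invoice_by_order_id" ∨ Hit tc "check_payment_status" := by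
    rw [Bool.or_eq_true, Bool.or_eq_true, contains_tools, contains_tools, contains_tools]
  simp only [List.foldl, List.any_cons, List.any_nil, Bool.or_false]
  rw [← e1, ← e2, ← e3]
  by_cases h1 : (PySem.Set.contains (PySem.Set.ofList (tc.map (fun call => PySem.Dict.get? (PySem.Dict.mk call) "name"))) (some "search_products") || PySem.Set.contains (PySem.Set.ofList (tc.map (fun call => PySem.Dict.get? (PySem.Dict.mk call) "name"))) (some "get_product_details")) = true <;>
  by_cases h2 : (PySem.Set.contains (PySem.Set.ofList (tc.map (fun call => PySem.Dict.get? (PySem.Dict.mk call) "name"))) (some "track_order") || PySem.Set.contains (PySem.Set.ofList (tc.map (fun call => PySem.Dict.get? (PySem.Dict.mk call) "name"))) (some "get_order_history")) = true <;>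
  by_cases h3 : (PySem.Set.contains (PySem.Set.ofList (tc.map (fun call => PySem.Dict.get? (PySem.Dict.mk call) "name"))) (some "get_invoice") || (PySem.Set.contains (PySem.Set.ofList (tc.map (fun call => PySem.Dict.get? (PySem.Dict.mk call) "name"))) (some "get_invoice_by_order_id") || PySem.Set.contains (PySem.Set.ofList (tc.map (fun call => PySem.Dict.get? (PySem.Dict.mk call) "name"))) (some "check_payment_status"))) = true <;>
    simp only [h1, h2, h3] <;>
    simp [PySem.Set.mem_add, PySem.Set.empty]

-- ===== VERDICT (by name: the statement is the Claim_ definition above) =====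
theorem validate_multi_agent_handoff_spec : Claim_equal_validate_multi_agent_handoff := by
  intro tc ea _
  show validate_multi_agent_handoff tc ea = validate_multi_agent_handoff_alt tc ea
  simp only [validate_multi_agent_handoff, validate_multi_agent_handoff_alt]
  congr 1
  funext a
  rw [show ∀ x y : Bool, (x = y) = ((x = true) ↔ (y = true)) from by decide]
  rw [PySem.Set.contains_iff, PySem.Set.contains_iff, memA, memB]
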